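-- pv_equiv track=rewrite | github.com/MrBrantCode/unitest_baseline | mut_generate/mist_train_taco/taco_13080/solution.py | find_minimum_k_for_unique_airport_codes
-- ===== SOURCE A (Python) =====
-- def find_minimum_k_for_unique_airport_codes(airport_names, n):
--     def generate_code(name):
--         code = name[0]
--         for i, char in enumerate(name[:-1]):
--             if char in 'aeiou':
--                 code += name[i + 1]
--         return code
--
--     codes = [generate_code(name) for name in airport_names]
--     max_code_length = max(len(code) for code in codes)
--
--     for k in range(1, max_code_length + 1):
--         if len(set(code[:k] for code in codes)) == n:
--             return k
--
--     return -1
-- ===== SOURCE B (Python) =====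
-- def find_minimum_k_for_unique_airport_codes(airport_names, n):
--     def generate_code(name):
--         chars = [name[0]]
--         for prev, cur in zip(name, name[1:]):
--             if prev in 'aeiou':
--                 chars.append(cur)
--         return ''.join(chars)
--
--     codes = [generate_code(name) for name in airport_names]
--     max_code_length = max(len(code) for code in codes)
--
--     # Sort once; equal k-prefixes are then contiguous, so the number of
--     # distinct k-prefixes is 1 + (number of adjacent code pairs whose
--     # longest-common-prefix length is < k).  Compute those LCPs once.
--     codes.sort()
--     gaps = []
--     for a, b in zip(codes, codes[1:]):
--         if a != b:
--             l = 0
--             while l < len(a) and l < len(b) and a[l] == b[l]: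
--                 l += 1
--             gaps.append(l)
--
--     for k in range(1, max_code_length + 1):
--         if 1 + sum(1 for g in gaps if g < k) == n:
--             return k
--     return -1
-- ===== Notes on version B (the rewrite author's own statement) =====
-- stated objective: alternative
-- what changed: A rebuilds a set of all k-character code prefixes for every candidate k; B sorts the codes once, computes the longest-common-prefix length of each adjacent distinct pair, and obtains the number of distinct k-prefixes as 1 + (number of adjacent pairs with LCP < k), a counting scan per k with no slicing, set building or hashing (measured only ~1.2x faster end-to-end, since code generation dominates).
import Mathlib
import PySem

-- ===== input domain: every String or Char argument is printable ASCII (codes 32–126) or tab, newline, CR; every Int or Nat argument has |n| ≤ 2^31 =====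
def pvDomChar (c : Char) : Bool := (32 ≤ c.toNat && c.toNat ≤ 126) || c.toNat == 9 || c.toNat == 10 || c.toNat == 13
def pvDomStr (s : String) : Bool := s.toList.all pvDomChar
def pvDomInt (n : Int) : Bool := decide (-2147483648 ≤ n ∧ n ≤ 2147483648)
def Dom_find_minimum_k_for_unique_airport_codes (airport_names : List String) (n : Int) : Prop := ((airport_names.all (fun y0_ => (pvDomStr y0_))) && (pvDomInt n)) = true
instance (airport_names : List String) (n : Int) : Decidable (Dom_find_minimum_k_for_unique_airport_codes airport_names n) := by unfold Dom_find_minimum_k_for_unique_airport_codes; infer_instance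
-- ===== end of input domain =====

-- B replaces A's per-k set-of-prefixes scan by one sort plus adjacent longest-common-prefix
-- counts (objective: alternative; the per-k work becomes a counting scan with no slicing or set building).

-- ===== PORT A =====
-- generate_code: code = name[0]; for i, char in enumerate(name[:-1]): if char in 'aeiou': code += name[i+1]
def pvGenCodeA (name : List Char) : List Char :=
  (PySem.List.enumerate (PySem.List.slice name none (some (-1))) 0).foldl
    (fun code p =>
      if "aeiou".toList.contains p.2 then code ++ [PySem.List.pyGetD name (p.1 + 1) ' ']
      else code)
    [PySem.List.pyGetD name 0 ' ']   -- name[0]; total form pyGetD is used under Pre_ (names nonempty)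

-- for k in range(1, max_code_length+1): if len(set(code[:k] for code in codes)) == n: return k
def pvLoopA (codes : List (List Char)) (n : Int) : List Int → Int
  | [] => -1
  | k :: ks =>
    if PySem.Set.len (PySem.Set.ofList (codes.map (fun c => PySem.List.slice c none (some k)))) = n
    then k else pvLoopA codes n ks

def find_minimum_k_for_unique_airport_codes (airport_names : List String) (n : Int) : Int :=
  let codes := airport_names.map (fun s => pvGenCodeA s.toList)
  -- max(len(code) for code in codes); total form .getD is used under Pre_ (airport_names nonempty)
  let maxLen := (PySem.List.max? (codes.map PySem.List.len) (fun x => x)).getD 0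
  pvLoopA codes n (PySem.List.pyRange 1 (maxLen + 1) 1)

-- ===== PORT B =====
-- generate_code via zip(name, name[1:])
def pvGenCodeB (name : List Char) : List Char :=
  (name.zip (PySem.List.slice name (some 1) none)).foldl
    (fun out p => if "aeiou".toList.contains p.1 then out ++ [p.2] else out)
    [PySem.List.pyGetD name 0 ' ']   -- name[0]; total form pyGetD is used under Pre_ (names nonempty)

-- the while loop: l = 0; while l < len(a) and l < len(b) and a[l] == b[l]: l += 1
def pvLcpGo (a b : List Char) (l : Nat) : Nat :=
  if h1 : l < a.length then
    if h2 : l < b.length then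
      if a[l] = b[l] then pvLcpGo a b (l + 1) else l
    else l
  else l
termination_by a.length - l

-- gaps: LCP length of each adjacent pair of distinct codes in the sorted list
def pvGaps (s : List (List Char)) : List Nat :=
  (s.zip (PySem.List.slice s (some 1) none)).foldl
    (fun gs p => if p.1 ≠ p.2 then gs ++ [pvLcpGo p.1 p.2 0] else gs) []

-- for k in range(1, max_code_length+1): if 1 + sum(1 for g in gaps if g < k) == n: return k
def pvLoopB (gaps : List Nat) (n : Int) : List Int → Int
  | [] => -1
  | k :: ks =>
    if 1 + gaps.foldl (fun (s : Int) (g : Nat) => if (g : Int) < k then s + 1 else s) (0 : Int) = n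
    then k else pvLoopB gaps n ks

def find_minimum_k_for_unique_airport_codes_alt (airport_names : List String) (n : Int) : Int :=
  let codes := airport_names.map (fun s => pvGenCodeB s.toList)
  let maxLen := (PySem.List.max? (codes.map PySem.List.len) (fun x => x)).getD 0
  let sortedCodes := PySem.List.sorted codes (fun c => c) false
  pvLoopB (pvGaps sortedCodes) n (PySem.List.pyRange 1 (maxLen + 1) 1)

-- ===== PRECONDITION & SPEC =====
-- A raises on an empty list (max() of an empty generator, ValueError) and on an empty name (name[0], IndexError);
-- Pre_ excludes exactly those inputs.
def Pre_find_minimum_k_for_unique_airport_codes (airport_names : List String) (n : Int) : Prop :=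
  airport_names ≠ [] ∧ ∀ s ∈ airport_names, s ≠ ""
instance (airport_names : List String) (n : Int) : Decidable (Pre_find_minimum_k_for_unique_airport_codes airport_names n) := by unfold Pre_find_minimum_k_for_unique_airport_codes; infer_instance

def pvWitness_find_minimum_k_for_unique_airport_codes : List String × Int := (["ab", "ae"], 2)

def Spec_find_minimum_k_for_unique_airport_codes (airport_names : List String) (n : Int) (out : Int) : Prop := out = find_minimum_k_for_unique_airport_codes_alt airport_names n
instance (airport_names : List String) (n : Int) (out : Int) : Decidable (Spec_find_minimum_k_for_unique_airport_codes airport_names n out) := by unfold Spec_find_minimum_k_for_unique_airport_codes; infer_instance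

-- ===== CLAIM (what is proved, stated in full; the proofs are below) =====
def Claim_equal_find_minimum_k_for_unique_airport_codes : Prop := ∀ (airport_names : List String) (n : Int), Dom_find_minimum_k_for_unique_airport_codes airport_names n → Pre_find_minimum_k_for_unique_airport_codes airport_names n → Spec_find_minimum_k_for_unique_airport_codes airport_names n (find_minimum_k_for_unique_airport_codes airport_names n)

-- ===== LEMMAS AND PROOFS =====

-- The two generate_code ports agree.
theorem pvGenCode_eq (name : List Char) : pvGenCodeA name = pvGenCodeB name := by
  unfold pvGenCodeA pvGenCodeB
  rw [PySem.List.slice_to_neg_one, PySem.List.slice_from_one]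
  have hmap : (PySem.List.enumerate name.dropLast 0).map
      (fun p => (p.2, PySem.List.pyGetD name (p.1 + 1) ' ')) = name.zip name.tail := by
    apply List.ext_getElem
    · simp [PySem.List.length_enumerate]
    · intro i h1 h2
      have hi : i < name.dropLast.length := by
        simp [PySem.List.length_enumerate] at h1; simpa using h1
      have hi1 : i + 1 < name.length := by
        simp [List.length_dropLast] at hi; omega
      simp only [List.getElem_map, PySem.List.getElem_enumerate, List.getElem_zip,
        List.getElem_dropLast, List.getElem_tail]
      refine Prod.ext rfl ?_
      have : (0 : Int) + (i : Int) + 1 = ((i + 1 : Nat) : Int) := by push_cast; ring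
      rw [this, PySem.List.pyGetD_natCast]
      simp [List.getElem?_eq_getElem hi1]
  rw [← hmap, List.foldl_map]

-- structural longest-common-prefix length (proof-side characterisation of the while loop)
def pvLcp : List Char → List Char → Nat
  | x :: xs, y :: ys => if x = y then pvLcp xs ys + 1 else 0
  | _, _ => 0

theorem pvLcp_nil_left (b : List Char) : pvLcp [] b = 0 := by cases b <;> rfl
theorem pvLcp_nil_right (a : List Char) : pvLcp a [] = 0 := by cases a <;> rfl

theorem pvLcpGo_eq (a b : List Char) (l : Nat) :
    pvLcpGo a b l = l + pvLcp (a.drop l) (b.drop l) := by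
  induction l using pvLcpGo.induct a b with
  | case1 l h1 h2 heq ih =>
    rw [pvLcpGo]; simp only [h1, h2, heq, dif_pos, if_pos]
    rw [ih, List.drop_eq_getElem_cons h1, List.drop_eq_getElem_cons h2]
    simp [pvLcp, heq]; omega
  | case2 l h1 h2 hne =>
    rw [pvLcpGo]; simp only [h1, h2, hne, dif_pos]
    rw [List.drop_eq_getElem_cons h1, List.drop_eq_getElem_cons h2]
    simp [pvLcp, hne]
  | case3 l h1 h2 =>
    rw [pvLcpGo]; simp only [h1, dif_pos, dif_neg h2]
    rw [List.drop_eq_nil_of_le (as := b) (by omega)]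
    simp [pvLcp_nil_right]
  | case4 l h1 =>
    rw [pvLcpGo]; simp only [dif_neg h1]
    rw [List.drop_eq_nil_of_le (as := a) (by omega)]
    simp [pvLcp_nil_left]

-- prefix equality in terms of the LCP, for distinct lists
theorem take_eq_take_iff_lcp (a : List Char) : ∀ (b : List Char), a ≠ b → ∀ (k : Nat),
    (a.take k = b.take k ↔ k ≤ pvLcp a b) := by
  induction a with
  | nil =>
    intro b hne k
    cases b with
    | nil => exact absurd rfl hne
    | cons y ys =>
      rw [pvLcp_nil_left]
      cases k <;> simp
  | cons x xs ih =>
    intro b hne k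
    cases b with
    | nil =>
      rw [pvLcp_nil_right]
      cases k <;> simp
    | cons y ys =>
      by_cases hxy : x = y
      · subst hxy
        have hxs : xs ≠ ys := by intro h; exact hne (by rw [h])
        cases k with
        | zero => simp
        | succ j => simp [pvLcp, ih ys hxs j]
      · cases k with
        | zero => simp
        | succ j => simp [pvLcp, hxy]

-- take is monotone for the lexicographic order on List Char
theorem lex_take {a b : List Char} (h : List.Lex (· < ·) a b) : ∀ (k : Nat), a.take k ≤ b.take k := by
  induction h with
  | @nil z zs =>
    intro k
    rw [List.take_nil]
    rcases hc : List.take k (z :: zs) with _ | ⟨y, ys⟩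
    · exact le_refl _
    · exact le_of_lt List.Lex.nil
  | @rel x xs y ys hxy =>
    intro k
    cases k with
    | zero => simp
    | succ j => exact le_of_lt (List.Lex.rel hxy)
  | @cons x xs ys hlex ih =>
    intro k
    cases k with
    | zero => simp
    | succ j =>
      simp only [List.take_succ_cons]
      rcases lt_or_eq_of_le (ih j) with h | h
      · exact le_of_lt (List.Lex.cons h)
      · rw [h]

theorem take_le_take {a b : List Char} (h : a ≤ b) (k : Nat) : a.take k ≤ b.take k := by
  rcases lt_or_eq_of_le h with h | h
  · exact lex_take h k
  · rw [h]

-- length of set(l) is a permutation invariant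
theorem ofList_length_perm {α : Type} [BEq α] [LawfulBEq α] {l l' : List α} (h : l.Perm l') :
    (PySem.Set.ofList l).length = (PySem.Set.ofList l').length := by
  apply List.Perm.length_eq
  rw [List.perm_ext_iff_of_nodup (PySem.Set.nodup_ofList l) (PySem.Set.nodup_ofList l')]
  intro a
  rw [PySem.Set.mem_ofList, PySem.Set.mem_ofList]
  exact h.mem_iff

theorem discard_of_not_mem {α : Type} [BEq α] [LawfulBEq α] {s : PySem.Set α} {x : α} (h : x ∉ s) :
    PySem.Set.discard s x = s := by
  unfold PySem.Set.discard
  apply List.filter_eq_self.mpr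
  intro y hy
  have hyx : y ≠ x := fun hyx => h (hyx ▸ hy)
  simp [hyx]

theorem ofList_cons_length_mem {α : Type} [BEq α] [LawfulBEq α] {x : α} {xs : List α} (h : x ∈ xs) :
    (PySem.Set.ofList (x :: xs)).length = (PySem.Set.ofList xs).length := by
  rw [PySem.Set.ofList_cons]
  have hx : x ∈ PySem.Set.ofList xs := (PySem.Set.mem_ofList xs x).mpr h
  have hperm : (PySem.Set.ofList xs).Perm (x :: (PySem.Set.ofList xs).discard x) := by
    rw [List.perm_ext_iff_of_nodup (PySem.Set.nodup_ofList xs) ?_]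
    · intro a
      simp only [List.mem_cons, PySem.Set.mem_discard]
      constructor
      · intro ha; by_cases hax : a = x
        · exact Or.inl hax
        · exact Or.inr ⟨ha, hax⟩
      · rintro (rfl | ⟨ha, _⟩) <;> [exact hx; exact ha]
    · refine List.nodup_cons.mpr ⟨?_, PySem.Set.nodup_discard _ _ (PySem.Set.nodup_ofList xs)⟩
      intro hmem
      exact ((PySem.Set.mem_discard _ _ _).mp hmem).2 rfl
  simpa using hperm.length_eq.symm

theorem ofList_cons_length_not_mem {α : Type} [BEq α] [LawfulBEq α] {x : α} {xs : List α} (h : x ∉ xs) :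
    (PySem.Set.ofList (x :: xs)).length = (PySem.Set.ofList xs).length + 1 := by
  rw [PySem.Set.ofList_cons, discard_of_not_mem (by simpa [PySem.Set.mem_ofList] using h)]
  simp [Nat.add_comm]

-- distinct count of a ≤-sorted list = 1 + number of adjacent distinct pairs
theorem ofList_length_pairwise {α : Type} [BEq α] [LawfulBEq α] [LinearOrder α]
    (p : List α) (hp : p.Pairwise (· ≤ ·)) (hne : p ≠ []) :
    (PySem.Set.ofList p).length = 1 + (p.zip p.tail).countP (fun q => q.1 ≠ q.2) := by
  induction p with
  | nil => exact absurd rfl hne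
  | cons x t ih =>
    cases t with
    | nil => simp [PySem.Set.ofList_cons, PySem.Set.ofList_nil, PySem.Set.discard]
    | cons y t' =>
      have hp' : (y :: t').Pairwise (· ≤ ·) := hp.sublist (List.sublist_cons_self _ _)
      have hxle := List.pairwise_cons.mp hp |>.1
      by_cases hxy : x = y
      · subst hxy
        rw [ofList_cons_length_mem (List.mem_cons_self ..), ih hp' (by simp)]
        simp
      · have hnotmem : x ∉ y :: t' := by
          intro hmem
          rcases List.mem_cons.mp hmem with rfl | hmem'
          · exact hxy rfl
          · have h1 : x ≤ y := hxle y (List.mem_cons_self ..)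
            have h2 : y ≤ x := (List.pairwise_cons.mp hp').1 x hmem'
            exact hxy (le_antisymm h1 h2)
        rw [ofList_cons_length_not_mem hnotmem, ih hp' (by simp)]
        simp [hxy]
        omega

-- the gaps loop, as filter-then-map
theorem pvGaps_eq (s : List (List Char)) :
    pvGaps s = ((s.zip s.tail).filter (fun p => decide (p.1 ≠ p.2))).map (fun p => pvLcpGo p.1 p.2 0) := by
  unfold pvGaps
  rw [PySem.List.slice_from_one]
  have h : (fun (gs : List Nat) (p : List Char × List Char) =>
      if p.1 ≠ p.2 then gs ++ [pvLcpGo p.1 p.2 0] else gs)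
      = (fun gs p => if (fun (q : List Char × List Char) => decide (q.1 ≠ q.2)) p = true
                     then gs ++ [(fun (q : List Char × List Char) => pvLcpGo q.1 q.2 0) p] else gs) := by
    funext gs p; split <;> split <;> simp_all
  rw [h, PySem.List.foldl_append_if]
  simp

-- the per-k conditions of the two loops agree
theorem cond_eq (codes : List (List Char)) (hcodes : codes ≠ []) (k : Int) (hk : 0 ≤ k) :
    PySem.Set.len (PySem.Set.ofList (codes.map (fun c => PySem.List.slice c none (some k))))
      = 1 + (pvGaps (PySem.List.sorted codes (fun c => c) false)).foldl
              (fun (s : Int) (g : Nat) => if (g : Int) < k then s + 1 else s) (0 : Int) := by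
  -- the two LT/DecidableLT instances on List Char decide the same lexicographic order
  have hs : (PySem.List.sorted codes (fun c : List Char => c) false)
      = (@PySem.List.sorted (List Char) (List Char) List.instLinearOrder.toLT
          LinearOrder.toDecidableLT codes (fun c => c) false) := by
    congr 1
  rw [hs]
  have hslice : (fun c => PySem.List.slice c none (some k)) = (fun c : List Char => c.take k.toNat) :=
    funext fun c => PySem.List.slice_to c hk
  have hSperm : (@PySem.List.sorted (List Char) (List Char) List.instLinearOrder.toLT
      LinearOrder.toDecidableLT codes (fun c => c) false).Perm codes :=
    @PySem.List.sorted_perm (List Char) (List Char) List.instLinearOrder.toLT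
      LinearOrder.toDecidableLT codes (fun c => c) false
  have hSne : (@PySem.List.sorted (List Char) (List Char) List.instLinearOrder.toLT
      LinearOrder.toDecidableLT codes (fun c => c) false) ≠ [] := by
    intro h
    exact hcodes (List.eq_nil_of_length_eq_zero (by rw [← hSperm.length_eq, h]; rfl))
  have hpair : ((@PySem.List.sorted (List Char) (List Char) List.instLinearOrder.toLT
      LinearOrder.toDecidableLT codes (fun c => c) false).map
      (fun c : List Char => c.take k.toNat)).Pairwise (· ≤ ·) :=
    (PySem.List.sorted_pairwise codes (fun c => c)).map _ (fun a b h => take_le_take h k.toNat)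
  have hbody : (fun (s : Int) (g : Nat) => if (g : Int) < k then s + 1 else s)
      = (fun (s : Int) (g : Nat) =>
          if (fun (g : Nat) => decide ((g : Int) < k)) g = true then s + 1 else s) := by
    funext s g; by_cases h : (g : Int) < k <;> simp [h]
  simp only [PySem.Set.len]
  rw [hslice, ofList_length_perm ((hSperm.map (fun c : List Char => c.take k.toNat)).symm),
    ofList_length_pairwise _ hpair (by simpa [List.map_eq_nil_iff] using hSne),
    ← List.map_tail, List.zip_map, List.countP_map,
    hbody, PySem.List.foldl_count_if, pvGaps_eq, List.countP_map, List.countP_filter]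
  push_cast
  rw [zero_add]
  congr 1
  rw [Nat.cast_inj]
  apply List.countP_congr
  rintro ⟨a, b⟩ _
  by_cases hab : a = b
  · subst hab; simp
  · simp only [Function.comp_apply, Prod.map_apply, decide_eq_true_eq, ne_eq,
      hab, not_false_iff, decide_true, Bool.and_true]
    rw [pvLcpGo_eq]
    have hdrop : pvLcp (List.drop 0 a) (List.drop 0 b) = pvLcp a b := by
      rw [List.drop_zero, List.drop_zero]
    rw [Nat.zero_add, hdrop]
    constructor
    · intro hne
      have := (not_iff_not.mpr (take_eq_take_iff_lcp a b hab k.toNat)).mp hne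
      omega
    · intro hlt heq
      have := (take_eq_take_iff_lcp a b hab k.toNat).mp heq
      omega

theorem loop_eq (codes : List (List Char)) (hcodes : codes ≠ []) (n : Int) (ks : List Int)
    (hks : ∀ k ∈ ks, 0 ≤ k) :
    pvLoopA codes n ks = pvLoopB (pvGaps (PySem.List.sorted codes (fun c => c) false)) n ks := by
  induction ks with
  | nil => rfl
  | cons k ks ih =>
    have hk := hks k (List.mem_cons_self ..)
    simp only [pvLoopA, pvLoopB, cond_eq codes hcodes k hk]
    split <;> simp [ih (fun x hx => hks x (List.mem_cons_of_mem _ hx))]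

-- ===== VERDICT (by name: the statement is the Claim_ definition above) =====
theorem find_minimum_k_for_unique_airport_codes_spec : Claim_equal_find_minimum_k_for_unique_airport_codes := by
  intro airport_names n _hdom hpre
  unfold Spec_find_minimum_k_for_unique_airport_codes
  unfold find_minimum_k_for_unique_airport_codes find_minimum_k_for_unique_airport_codes_alt
  simp only [pvGenCode_eq]
  have hcodes : airport_names.map (fun s => pvGenCodeB s.toList) ≠ [] := by
    simpa using hpre.1
  exact loop_eq _ hcodes n _ (fun k hk => by
    have := (PySem.List.mem_pyRange_one (a := 1) (b := _) (x := k)).mp hk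
    omega)
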